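-- pv_equiv track=rewrite | github.com/fbkeskin/robotik-odev1 | pythonProject/soruIki.py | tamSayiBolenBulma
-- ===== SOURCE A (Python) =====
-- def tamSayiBolenBulma(sayi):
--     bolenListesi=[]
--     for i in range(1,sayi+1):
--         if(sayi%i==0):
--             bolenListesi.append(-i)
--             bolenListesi.append(i)
--             bolenListesi.sort()
--     return bolenListesi
-- ===== SOURCE B (Python) =====
-- def tamSayiBolenBulma(sayi):
--     # Trial division up to sqrt(sayi): collect each divisor pair once,
--     # then build the sorted +/- list in one concatenation (no repeated sorting).
--     if sayi <= 0:
--         return []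
--     small = []
--     large = []
--     i = 1
--     while i * i <= sayi:
--         if sayi % i == 0:
--             small.append(i)
--             if i * i != sayi:
--                 large.append(sayi // i)
--         i += 1
--     pos = small + large[::-1]
--     return [-d for d in reversed(pos)] + pos
-- ===== Notes on version B (the rewrite author's own statement) =====
-- stated objective: faster
-- what changed: Replaces the full 1..n scan with repeated in-loop sorting by trial division up to sqrt(n) collecting divisor pairs, building the sorted signed list with one concatenation.
import Mathlib
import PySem

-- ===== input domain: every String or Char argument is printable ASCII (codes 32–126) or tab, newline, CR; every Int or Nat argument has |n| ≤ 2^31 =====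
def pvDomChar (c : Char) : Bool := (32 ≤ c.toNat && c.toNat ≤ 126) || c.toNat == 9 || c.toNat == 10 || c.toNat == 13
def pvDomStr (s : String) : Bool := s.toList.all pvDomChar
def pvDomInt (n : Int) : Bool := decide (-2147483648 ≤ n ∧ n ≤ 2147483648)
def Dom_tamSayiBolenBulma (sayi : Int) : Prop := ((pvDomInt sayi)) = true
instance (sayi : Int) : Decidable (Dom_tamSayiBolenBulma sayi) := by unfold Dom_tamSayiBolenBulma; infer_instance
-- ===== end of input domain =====

-- B replaces A's full 1..n scan with in-loop re-sorting by trial division up to sqrt(n),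
-- collecting divisor pairs and building the sorted signed list with one concatenation (faster).

-- ===== PORT A =====
def tamSayiBolenBulma (sayi : Int) : List Int :=
  (PySem.List.pyRange 1 (sayi + 1)).foldl
    (fun bolenListesi i =>
      if PySem.Int.mod sayi i == 0 then
        PySem.List.sorted (bolenListesi ++ [-i] ++ [i]) (fun x => x)
      else bolenListesi) []

-- ===== PORT B =====
-- the 'while i * i <= sayi' loop of Source B
def bDivLoop (sayi i : Int) (small large : List Int) : List Int × List Int :=
  if i * i ≤ sayi then
    if PySem.Int.mod sayi i == 0 then
      bDivLoop sayi (i + 1) (small ++ [i])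
        (if i * i ≠ sayi then large ++ [PySem.Int.floordiv sayi i] else large)
    else bDivLoop sayi (i + 1) small large
  else (small, large)
termination_by (sayi + 1 - i).toNat
decreasing_by
  all_goals
    have hle : i ≤ sayi := by nlinarith [sq_nonneg (i - 1)]
    omega

def tamSayiBolenBulma_alt (sayi : Int) : List Int :=
  if sayi ≤ 0 then []
  else
    let p := bDivLoop sayi 1 [] []
    let pos := p.1 ++ p.2.reverse
    pos.reverse.map (fun d => -d) ++ pos

-- ===== PRECONDITION & SPEC =====
def Spec_tamSayiBolenBulma (sayi : Int) (out : List Int) : Prop := out = tamSayiBolenBulma_alt sayi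
instance (sayi : Int) (out : List Int) : Decidable (Spec_tamSayiBolenBulma sayi out) := by unfold Spec_tamSayiBolenBulma; infer_instance

-- ===== CLAIM (what is proved, stated in full; the proofs are below) =====
def Claim_equal_tamSayiBolenBulma : Prop := ∀ (sayi : Int), Dom_tamSayiBolenBulma sayi → Spec_tamSayiBolenBulma sayi (tamSayiBolenBulma sayi)

-- ===== LEMMAS AND PROOFS =====

-- the increasing list of positive divisors of n, and the mirrored signed list
def pvDivs (n : Int) : List Int :=
  (PySem.List.pyRange 1 (n + 1)).filter (fun j => PySem.Int.mod n j == 0)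

def pvMirror (ds : List Int) : List Int := ds.reverse.map (fun d => -d) ++ ds

lemma pvMirror_pairwise {ds : List Int} (hpos : ∀ d ∈ ds, 0 < d)
    (hp : ds.Pairwise (· < ·)) : (pvMirror ds).Pairwise (· < ·) := by
  unfold pvMirror
  rw [List.pairwise_append]
  refine ⟨?_, hp, ?_⟩
  · rw [List.pairwise_map, List.pairwise_reverse]
    exact hp.imp (by intro a b h; omega)
  · intro a ha b hb
    simp only [List.mem_map, List.mem_reverse] at ha
    obtain ⟨d, hd, rfl⟩ := ha
    have := hpos d hd
    have := hpos b hb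
    omega

-- A's loop body on the mirrored state: sorting after appending -j, j just extends the mirror
lemma foldA_step (j : Int) (ds : List Int) (hpos : ∀ d ∈ ds, 0 < d) (hj : 0 < j)
    (hlt : ∀ d ∈ ds, d < j) (hp : ds.Pairwise (· < ·)) :
    PySem.List.sorted (pvMirror ds ++ [-j] ++ [j]) (fun x => x) = pvMirror (ds ++ [j]) := by
  have hperm : (pvMirror (ds ++ [j])).Perm (pvMirror ds ++ [-j] ++ [j]) := by
    have hshape : pvMirror (ds ++ [j]) = -j :: (pvMirror ds ++ [j]) := by
      unfold pvMirror; simp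
    rw [hshape, List.append_assoc]
    exact (List.perm_middle (a := -j) (l₁ := pvMirror ds) (l₂ := [j])).symm
  have hpw : (pvMirror (ds ++ [j])).Pairwise (· < ·) := by
    apply pvMirror_pairwise
    · intro d hd
      rcases List.mem_append.1 hd with h | h
      · exact hpos d h
      · simp at h; omega
    · rw [List.pairwise_append]
      exact ⟨hp, List.pairwise_singleton _ _, by
        intro a ha b hb; simp at hb; subst hb; exact hlt a ha⟩
  exact PySem.List.sorted_eq_of_perm_of_pairwise_lt _ _ _ hperm hpw

lemma foldA (n : Int) : ∀ (m : Nat),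
    ((PySem.List.pyRange 1 ((m : Int) + 1)).foldl
      (fun bolenListesi i =>
        if PySem.Int.mod n i == 0 then
          PySem.List.sorted (bolenListesi ++ [-i] ++ [i]) (fun x => x)
        else bolenListesi) []) =
    pvMirror ((PySem.List.pyRange 1 ((m : Int) + 1)).filter (fun j => PySem.Int.mod n j == 0)) := by
  intro m
  induction m with
  | zero =>
    rw [PySem.List.pyRange_one_eq_nil (by omega)]
    simp [pvMirror]
  | succ m ih =>
    have hcast : ((m + 1 : Nat) : Int) + 1 = ((m : Int) + 1) + 1 := by push_cast; ring
    rw [hcast, PySem.List.pyRange_one_succ_right (by omega), List.foldl_append,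
      List.filter_append, ih]
    have hds_mem : ∀ d ∈ (PySem.List.pyRange 1 ((m : Int) + 1)).filter
        (fun j => PySem.Int.mod n j == 0), 1 ≤ d ∧ d < (m : Int) + 1 := by
      intro d hd
      have := (List.mem_filter.1 hd).1
      rw [PySem.List.mem_pyRange_one] at this
      omega
    by_cases hmod : (PySem.Int.mod n ((m : Int) + 1) == 0) = true
    · have hstep := foldA_step ((m : Int) + 1)
        ((PySem.List.pyRange 1 ((m : Int) + 1)).filter (fun j => PySem.Int.mod n j == 0))
        (fun d hd => by have := hds_mem d hd; omega) (by omega)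
        (fun d hd => by have := hds_mem d hd; omega)
        ((PySem.List.pairwise_lt_pyRange_one 1 ((m : Int) + 1)).filter _)
      simp only [List.foldl_cons, List.foldl_nil, hmod, if_pos, List.filter_cons,
        List.filter_nil, hstep]
    · rw [List.foldl_cons, if_neg hmod, List.foldl_nil, List.filter_cons, if_neg hmod,
        List.filter_nil, List.append_nil]
lemma portA_eq (n : Int) : tamSayiBolenBulma n = pvMirror (pvDivs n) := by
  unfold tamSayiBolenBulma pvDivs
  by_cases hn : 0 ≤ n
  · have h := foldA n n.toNat
    rw [show ((n.toNat : Nat) : Int) = n by omega] at h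
    exact h
  · rw [PySem.List.pyRange_one_eq_nil (by omega)]
    simp [pvMirror]

-- ---- B side ----

lemma pvSq_le_iff {n i : Int} (hn : 0 ≤ n) (hi : 1 ≤ i) : i * i ≤ n ↔ i ≤ Int.sqrt n := by
  unfold Int.sqrt
  constructor
  · intro h
    have h1 : i.toNat * i.toNat ≤ n.toNat := by
      have h2 : ((i.toNat : Nat) : Int) = i := by omega
      have h3 : ((n.toNat : Nat) : Int) = n := by omega
      have h4 : ((i.toNat : Nat) : Int) * ((i.toNat : Nat) : Int) ≤ ((n.toNat : Nat) : Int) := by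
        rw [h2, h3]; exact h
      exact_mod_cast h4
    have := Nat.le_sqrt.2 h1
    omega
  · intro h
    have h0 : 0 ≤ Int.sqrt n := Int.sqrt_nonneg n
    have h1 : Nat.sqrt n.toNat * Nat.sqrt n.toNat ≤ n.toNat := Nat.sqrt_le n.toNat
    have h2 : i * i ≤ (Nat.sqrt n.toNat : Int) * (Nat.sqrt n.toNat : Int) := by
      have hi0 : 0 ≤ i := by omega
      unfold Int.sqrt at h
      exact mul_le_mul h h hi0 (by positivity)
    calc i * i ≤ (Nat.sqrt n.toNat : Int) * (Nat.sqrt n.toNat : Int) := h2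
      _ = ((Nat.sqrt n.toNat * Nat.sqrt n.toNat : Nat) : Int) := by push_cast; ring
      _ ≤ n := by omega

lemma pvSqrt_sq_le {n : Int} (hn : 0 ≤ n) : Int.sqrt n * Int.sqrt n ≤ n := by
  have h1 : Nat.sqrt n.toNat * Nat.sqrt n.toNat ≤ n.toNat := Nat.sqrt_le n.toNat
  unfold Int.sqrt
  calc (Nat.sqrt n.toNat : Int) * (Nat.sqrt n.toNat : Int)
      = ((Nat.sqrt n.toNat * Nat.sqrt n.toNat : Nat) : Int) := by push_cast; ring
    _ ≤ n := by omega

lemma pvLt_succ_sqrt {n : Int} (hn : 0 ≤ n) : n < (Int.sqrt n + 1) * (Int.sqrt n + 1) := by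
  have h1 : n.toNat < (Nat.sqrt n.toNat + 1) * (Nat.sqrt n.toNat + 1) := Nat.lt_succ_sqrt n.toNat
  unfold Int.sqrt
  have : (((Nat.sqrt n.toNat + 1) * (Nat.sqrt n.toNat + 1) : Nat) : Int)
      = ((Nat.sqrt n.toNat : Int) + 1) * ((Nat.sqrt n.toNat : Int) + 1) := by push_cast; ring
  omega

lemma bDivLoop_spec (n : Int) (hn : 1 ≤ n) : ∀ (fuel : Nat) (i : Int), 1 ≤ i →
    fuel = (Int.sqrt n + 1 - i).toNat →
    ∀ small large,
    bDivLoop n i small large =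
      (small ++ (PySem.List.pyRange i (Int.sqrt n + 1)).filter (fun j => PySem.Int.mod n j == 0),
       large ++ ((PySem.List.pyRange i (Int.sqrt n + 1)).filter
          (fun j => PySem.Int.mod n j == 0 && !(j * j == n))).map (fun j => PySem.Int.floordiv n j)) := by
  intro fuel
  induction fuel with
  | zero =>
    intro i hi hf small large
    have hri : Int.sqrt n + 1 ≤ i := by omega
    have hgt : ¬ (i * i ≤ n) := by
      intro h
      have := (pvSq_le_iff (by omega) hi).1 h
      omega
    rw [bDivLoop, if_neg hgt, PySem.List.pyRange_one_eq_nil hri]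
    simp
  | succ fuel ih =>
    intro i hi hf small large
    have hir : i ≤ Int.sqrt n := by omega
    have hle : i * i ≤ n := (pvSq_le_iff (by omega) hi).2 hir
    rw [bDivLoop, if_pos hle, PySem.List.pyRange_one_cons (by omega)]
    by_cases hmod : (PySem.Int.mod n i == 0) = true
    · rw [if_pos hmod, ih (i + 1) (by omega) (by omega)]
      by_cases hsq : i * i = n
      · rw [if_neg (by omega)]
        simp [hmod, hsq]
      · rw [if_pos (by omega)]
        simp [hmod, hsq]
    · rw [if_neg hmod, ih (i + 1) (by omega) (by omega)]
      simp [hmod]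

-- arithmetic core: d ↦ n/d pairs divisors below the square root with those above it
lemma pvDiv_pos {n j : Int} (hn : 1 ≤ n) (hj : 1 ≤ j) (hd : j ∣ n) : 1 ≤ n / j := by
  rcases hd with ⟨c, rfl⟩
  rw [Int.mul_ediv_cancel_left _ (by omega)]
  nlinarith

lemma pvDiv_mul {n j : Int} (hd : j ∣ n) : (n / j) * j = n :=
  Int.ediv_mul_cancel hd

lemma pvDiv_div {n j : Int} (hn : n ≠ 0) (hj : j ≠ 0) (hd : j ∣ n) : n / (n / j) = j := by
  rcases hd with ⟨c, rfl⟩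
  have hc : c ≠ 0 := by rintro rfl; simp at hn
  rw [Int.mul_ediv_cancel_left _ hj, mul_comm, Int.mul_ediv_cancel_left _ hc]

-- forward: a small divisor j (j*j ≠ n) maps to a large one
lemma pvPair_fwd {n j : Int} (hn : 1 ≤ n) (hj : 1 ≤ j) (hjr : j ≤ Int.sqrt n)
    (hd : j ∣ n) (hne : j * j ≠ n) :
    Int.sqrt n + 1 ≤ n / j ∧ n / j < n + 1 ∧ (n / j) ∣ n := by
  have hq1 : 1 ≤ n / j := pvDiv_pos hn hj hd
  have hqm : (n / j) * j = n := pvDiv_mul hd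
  have hjj : j * j ≤ n := by
    calc j * j ≤ Int.sqrt n * Int.sqrt n := mul_le_mul hjr hjr (by omega) (Int.sqrt_nonneg n)
      _ ≤ n := pvSqrt_sq_le (by omega)
  have hlt' : j * j < n := lt_of_le_of_ne hjj hne
  have hjlt : j < n / j := by
    by_contra hcon
    have h5 : (n / j) * j ≤ j * j :=
      mul_le_mul_of_nonneg_right (by omega) (by omega)
    omega
  refine ⟨?_, by nlinarith, ⟨j, hqm.symm⟩⟩
  -- n / j > sqrt n
  by_contra hcon
  push_neg at hcon
  have : n / j ≤ Int.sqrt n := by omega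
  have : (n / j) * (n / j) ≤ n := by
    calc (n / j) * (n / j) ≤ Int.sqrt n * Int.sqrt n :=
          mul_le_mul this this (by omega) (Int.sqrt_nonneg n)
      _ ≤ n := pvSqrt_sq_le (by omega)
  nlinarith

-- backward: a large divisor x comes from the small divisor n/x
lemma pvPair_bwd {n x : Int} (hn : 1 ≤ n) (hx1 : Int.sqrt n + 1 ≤ x) (hx2 : x < n + 1)
    (hd : x ∣ n) :
    1 ≤ n / x ∧ n / x ≤ Int.sqrt n ∧ (n / x) ∣ n ∧ (n / x) * (n / x) ≠ n ∧ n / (n / x) = x := by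
  have hr0 : 0 ≤ Int.sqrt n := Int.sqrt_nonneg n
  have hx0 : 1 ≤ x := by omega
  have hq1 : 1 ≤ n / x := pvDiv_pos hn hx0 hd
  have hqm : (n / x) * x = n := pvDiv_mul hd
  have hlt : n < (Int.sqrt n + 1) * (Int.sqrt n + 1) := pvLt_succ_sqrt (by omega)
  have hqr : n / x ≤ Int.sqrt n := by nlinarith
  have hqd : (n / x) ∣ n := ⟨x, hqm.symm⟩
  refine ⟨hq1, hqr, hqd, ?_, pvDiv_div (by omega) (by omega) hd⟩
  intro hsq
  -- then n / x = x, contradicting n / x ≤ sqrt < x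
  have : (n / x) * (n / x) = (n / x) * x := by rw [hsq, hqm]
  have : n / x = x := by
    have h0 : n / x ≠ 0 := by omega
    exact mul_left_cancel₀ h0 this
  omega

-- the reversed large list IS the list of divisors above the square root
lemma pvLarge_eq (n : Int) (hn : 1 ≤ n) :
    (((PySem.List.pyRange 1 (Int.sqrt n + 1)).filter
        (fun j => PySem.Int.mod n j == 0 && !(j * j == n))).map (fun j => PySem.Int.floordiv n j)).reverse
    = (PySem.List.pyRange (Int.sqrt n + 1) (n + 1)).filter (fun j => PySem.Int.mod n j == 0) := by
  have hmemG : ∀ j ∈ (PySem.List.pyRange 1 (Int.sqrt n + 1)).filter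
      (fun j => PySem.Int.mod n j == 0 && !(j * j == n)),
      1 ≤ j ∧ j ≤ Int.sqrt n ∧ j ∣ n ∧ j * j ≠ n := by
    intro j hj
    have h1 := (List.mem_filter.1 hj).1
    have h2 := (List.mem_filter.1 hj).2
    rw [PySem.List.mem_pyRange_one] at h1
    simp only [Bool.and_eq_true, beq_iff_eq, Bool.not_eq_true', beq_eq_false_iff_ne] at h2
    exact ⟨by omega, by omega, (PySem.Int.mod_eq_zero_iff_dvd n j).1 h2.1, h2.2⟩
  -- map by floordiv = map by exact division on this list
  have hmapeq : ((PySem.List.pyRange 1 (Int.sqrt n + 1)).filter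
        (fun j => PySem.Int.mod n j == 0 && !(j * j == n))).map (fun j => PySem.Int.floordiv n j)
      = ((PySem.List.pyRange 1 (Int.sqrt n + 1)).filter
        (fun j => PySem.Int.mod n j == 0 && !(j * j == n))).map (fun j => n / j) := by
    apply List.map_congr_left
    intro j hj
    exact PySem.Int.floordiv_eq_ediv_of_pos (by have := hmemG j hj; omega)
  rw [hmapeq]
  -- both sides strictly increasing with the same members ⇒ equal
  have hpwG : ((PySem.List.pyRange 1 (Int.sqrt n + 1)).filter
      (fun j => PySem.Int.mod n j == 0 && !(j * j == n))).Pairwise (· < ·) :=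
    (PySem.List.pairwise_lt_pyRange_one _ _).filter _
  have hpwL : ((((PySem.List.pyRange 1 (Int.sqrt n + 1)).filter
      (fun j => PySem.Int.mod n j == 0 && !(j * j == n))).map (fun j => n / j)).reverse).Pairwise (· < ·) := by
    rw [List.pairwise_reverse, List.pairwise_map]
    refine hpwG.imp_of_mem ?_
    intro a b ha hb hab
    obtain ⟨ha1, _, had, _⟩ := hmemG a ha
    obtain ⟨hb1, _, hbd, _⟩ := hmemG b hb
    have hma : (n / a) * a = n := pvDiv_mul had
    have hmb : (n / b) * b = n := pvDiv_mul hbd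
    have hqa : 1 ≤ n / a := pvDiv_pos hn ha1 had
    have hqb : 1 ≤ n / b := pvDiv_pos hn hb1 hbd
    nlinarith
  have hpwR : ((PySem.List.pyRange (Int.sqrt n + 1) (n + 1)).filter
      (fun j => PySem.Int.mod n j == 0)).Pairwise (· < ·) :=
    (PySem.List.pairwise_lt_pyRange_one _ _).filter _
  have hperm : ((((PySem.List.pyRange 1 (Int.sqrt n + 1)).filter
      (fun j => PySem.Int.mod n j == 0 && !(j * j == n))).map (fun j => n / j)).reverse).Perm
      ((PySem.List.pyRange (Int.sqrt n + 1) (n + 1)).filter (fun j => PySem.Int.mod n j == 0)) := by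
    rw [List.perm_ext_iff_of_nodup (hpwL.imp ne_of_lt) (hpwR.imp ne_of_lt)]
    intro x
    simp only [List.mem_reverse, List.mem_map, List.mem_filter, PySem.List.mem_pyRange_one,
      Bool.and_eq_true, beq_iff_eq, Bool.not_eq_true', beq_eq_false_iff_ne]
    constructor
    · rintro ⟨j, ⟨⟨hj1, hj2⟩, hjd, hjne⟩, rfl⟩
      have hd : j ∣ n := (PySem.Int.mod_eq_zero_iff_dvd n j).1 hjd
      obtain ⟨w1, w2, w3⟩ := pvPair_fwd hn hj1 (by omega) hd hjne
      exact ⟨⟨w1, w2⟩, (PySem.Int.mod_eq_zero_iff_dvd n _).2 w3⟩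
    · rintro ⟨⟨hx1, hx2⟩, hxd⟩
      have hd : x ∣ n := (PySem.Int.mod_eq_zero_iff_dvd n x).1 hxd
      obtain ⟨w1, w2, w3, w4, w5⟩ := pvPair_bwd hn hx1 hx2 hd
      exact ⟨n / x, ⟨⟨w1, by omega⟩, (PySem.Int.mod_eq_zero_iff_dvd n _).2 w3, w4⟩, w5⟩
  exact PySem.List.eq_of_perm_of_pairwise_le_of_injective (fun x => x) (fun a b h => h)
    hperm (hpwL.imp le_of_lt) (hpwR.imp le_of_lt)

lemma portB_eq (n : Int) (hn : 1 ≤ n) : tamSayiBolenBulma_alt n = pvMirror (pvDivs n) := by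
  have hr0 : 0 ≤ Int.sqrt n := Int.sqrt_nonneg n
  have hrn : Int.sqrt n ≤ n := by
    have := pvSqrt_sq_le (show (0:Int) ≤ n by omega)
    nlinarith
  unfold tamSayiBolenBulma_alt
  rw [if_neg (by omega)]
  rw [bDivLoop_spec n hn _ 1 (by omega) rfl [] []]
  simp only [List.nil_append]
  have hsplit : pvDivs n =
      (PySem.List.pyRange 1 (Int.sqrt n + 1)).filter (fun j => PySem.Int.mod n j == 0) ++
      (PySem.List.pyRange (Int.sqrt n + 1) (n + 1)).filter (fun j => PySem.Int.mod n j == 0) := by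
    unfold pvDivs
    rw [PySem.List.pyRange_one_append 1 (Int.sqrt n + 1) (n + 1) (by omega) (by omega),
      List.filter_append]
  rw [pvLarge_eq n hn, ← hsplit]
  rfl

-- ===== VERDICT (by name: the statement is the Claim_ definition above) =====
theorem tamSayiBolenBulma_spec : Claim_equal_tamSayiBolenBulma := by
  intro n _
  unfold Spec_tamSayiBolenBulma
  by_cases hn : 1 ≤ n
  · rw [portA_eq, portB_eq n hn]
  · rw [portA_eq]
    have h1 : PySem.List.pyRange 1 (n + 1) = [] := PySem.List.pyRange_one_eq_nil (by omega)
    simp [tamSayiBolenBulma_alt, pvDivs, pvMirror, h1, show n ≤ 0 by omega]
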